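-- pv_equiv track=rewrite | github.com/alex31/clockgen_stm32l476 | SOUNDS/generate_mp3_asset.py | choose_loop_end
-- ===== SOURCE A (Python) =====
-- def choose_loop_end(samples, match_samples, search_samples):
--     total = len(samples)
--     if total <= (match_samples * 2):
--         return total
--
--     search_span = min(search_samples, max(match_samples * 2, total // 8))
--     first_candidate = max(match_samples + 1, total - search_span)
--     head = samples[:match_samples]
--     head_first = samples[0]
--     head_next = samples[1]
--
--     best_end = total
--     best_score = None
--     for end in range(first_candidate, total + 1):
--         tail_start = end - match_samples
--         score = 0
--         for i in range(match_samples):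
--             delta = samples[tail_start + i] - head[i]
--             score += delta * delta
--
--         tail_last = samples[end - 1]
--         tail_prev = samples[end - 2]
--         edge_delta = tail_last - head_first
--         slope_delta = (tail_last - tail_prev) - (head_next - head_first)
--         score += 32 * edge_delta * edge_delta
--         score += 8 * slope_delta * slope_delta
--
--         if best_score is None or score < best_score:
--             best_score = score
--             best_end = end
--
--     return best_end
-- ===== SOURCE B (Python) =====
-- def choose_loop_end(samples, match_samples, search_samples):
--     total = len(samples)
--     if total <= match_samples * 2:
--         return total
--
--     search_span = min(search_samples, max(match_samples * 2, total // 8))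
--     first_candidate = max(match_samples + 1, total - search_span)
--
--     m = match_samples
--     head_first = samples[0]
--     head_next = samples[1]
--
--     # prefix sums of the values and of their squares
--     pre = [0]
--     pre_sq = [0]
--     for v in samples:
--         pre.append(pre[-1] + v)
--         pre_sq.append(pre_sq[-1] + v * v)
--     head_sum = pre[m]
--     head_sq = pre_sq[m]
--
--     # Cross-correlation of every length-m window with the head, all shifts at
--     # once, by ONE big-integer multiplication (Kronecker substitution): the
--     # (shifted, non-negative) samples and the reversed head become the base-B
--     # digits (B = 256**width) of two huge integers, and the base-B digits of
--     # their product are exactly the window/head correlations.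
--     shift = 0
--     for v in samples:
--         shift = max(shift, abs(v))
--     width = max(4 * m * shift * shift, 2 * shift).bit_length() // 8 + 1
--     enc_samples = int.from_bytes(
--         b"".join((v + shift).to_bytes(width, "little") for v in samples), "little")
--     enc_head = int.from_bytes(
--         b"".join((h + shift).to_bytes(width, "little")
--                  for h in reversed(samples[:m])), "little")
--     prod_bytes = (enc_samples * enc_head).to_bytes((total + m) * width, "little")
--
--     def digit(k):
--         return int.from_bytes(prod_bytes[k * width:(k + 1) * width], "little")
--
--     def score(end):
--         t = end - m
--         cross = digit(end - 1) - shift * (pre[end] - pre[t]) - shift * head_sum - m * shift * shift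
--         match_score = pre_sq[end] - pre_sq[t] - 2 * cross + head_sq
--         tail_last = samples[end - 1]
--         tail_prev = samples[end - 2]
--         edge = tail_last - head_first
--         slope = (tail_last - tail_prev) - (head_next - head_first)
--         return match_score + 32 * edge * edge + 8 * slope * slope
--
--     return min(range(first_candidate, total + 1), key=score, default=total)
-- ===== Notes on version B (the rewrite author's own statement) =====
-- stated objective: alternative
-- what changed: B computes the cross-correlation of every candidate window with the head for ALL shifts at once by a single big-integer multiplication (Kronecker substitution: shifted samples and reversed head as base-256**width digits, product digits = correlations), combines it with prefix sums of values and squares to get each score in O(1), and picks the argmin with min(range,key=...); …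
-- outside the precondition, e.g. on choose_loop_end([1, 2, 3], -1, 5): A returns 3, B raises OverflowError
import Mathlib
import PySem

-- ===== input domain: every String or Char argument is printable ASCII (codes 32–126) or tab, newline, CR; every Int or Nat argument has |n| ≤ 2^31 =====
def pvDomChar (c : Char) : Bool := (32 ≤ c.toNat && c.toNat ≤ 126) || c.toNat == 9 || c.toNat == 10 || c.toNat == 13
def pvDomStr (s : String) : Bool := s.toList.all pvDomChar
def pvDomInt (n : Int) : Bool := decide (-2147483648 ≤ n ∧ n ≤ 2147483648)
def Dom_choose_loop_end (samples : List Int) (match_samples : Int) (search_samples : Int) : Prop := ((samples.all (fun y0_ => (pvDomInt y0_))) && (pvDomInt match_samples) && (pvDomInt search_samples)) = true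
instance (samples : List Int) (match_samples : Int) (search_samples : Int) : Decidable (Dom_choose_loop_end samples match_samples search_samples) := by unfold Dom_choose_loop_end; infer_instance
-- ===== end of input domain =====

-- B computes every window/head cross-correlation at once by one big-integer multiplication
-- (Kronecker substitution) plus prefix sums, replacing A's per-candidate inner squared-difference loop.
-- Pre_ restricts to the natural domain 0 ≤ match_samples (B's byte encoding raises on negative
-- counts) and excludes lists of <2 elements with total > 2*match_samples (A raises IndexError).


-- ===== PORT A =====
-- inner 'for i in range(match_samples)' loop of A
def pvA_innerScore (samples head : List Int) (match_samples tail_start : Int) : Int :=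
  (PySem.List.pyRange 0 match_samples 1).foldl (fun acc i =>
    let delta := PySem.List.pyGetD samples (tail_start + i) 0 - PySem.List.pyGetD head i 0
    acc + delta * delta) 0

-- body of A's 'for end in range(...)' loop, up to the best-score update
def pvA_score (samples head : List Int) (match_samples head_first head_next e : Int) : Int :=
  let tail_start := e - match_samples
  let score := pvA_innerScore samples head match_samples tail_start
  let tail_last := PySem.List.pyGetD samples (e - 1) 0
  let tail_prev := PySem.List.pyGetD samples (e - 2) 0
  let edge_delta := tail_last - head_first
  let slope_delta := (tail_last - tail_prev) - (head_next - head_first)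
  let score := score + 32 * edge_delta * edge_delta
  let score := score + 8 * slope_delta * slope_delta
  score

-- 'if best_score is None or score < best_score' update of (best_score, best_end)
def pvA_update (score e : Int) (st : Option Int × Int) : Option Int × Int :=
  match st.1 with
  | none => (some score, e)
  | some bs => if score < bs then (some score, e) else st

def choose_loop_end (samples : List Int) (match_samples : Int) (search_samples : Int) : Int :=
  let total : Int := samples.length
  if total ≤ match_samples * 2 then total
  else
    let search_span := min search_samples (max (match_samples * 2) (PySem.Int.floordiv total 8))
    let first_candidate := max (match_samples + 1) (total - search_span)
    let head := PySem.List.slice samples none (some match_samples)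
    let head_first := PySem.List.pyGetD samples 0 0
    let head_next := PySem.List.pyGetD samples 1 0
    ((PySem.List.pyRange first_candidate (total + 1) 1).foldl
      (fun st e => pvA_update (pvA_score samples head match_samples head_first head_next e) e st)
      (none, total)).2

-- ===== PORT B =====
-- 'pre = [0]; pre_sq = [0]; for v in samples: pre.append(pre[-1] + v); pre_sq.append(pre_sq[-1] + v*v)'
def pvB_prefixes (samples : List Int) : List Int × List Int :=
  samples.foldl (fun st v =>
    (st.1 ++ [PySem.List.pyGetD st.1 (-1) 0 + v],
     st.2 ++ [PySem.List.pyGetD st.2 (-1) 0 + v * v])) ([0], [0])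

-- 'shift = 0; for v in samples: shift = max(shift, abs(v))'
def pvB_shift (samples : List Int) : Int :=
  samples.foldl (fun s v => max s |v|) 0

-- int.from_bytes(b"".join((x + shift).to_bytes(width, "little") for x in xs), "little"):
-- value number j of the iteration lands at byte offset j*width, i.e. the result is
-- Σ_j (x_j + shift) * (256^width)^j.  Exact for 0 ≤ x_j + shift < 256^width, which holds
-- on every input admitted by Pre_ (shift bounds |x_j| and 256^width > 2*shift).
def pvB_encode (xs : List Int) (shift base : Int) : Int :=
  (PySem.List.enumerate xs).foldl (fun acc p => acc + (p.2 + shift) * base ^ p.1.toNat) 0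

-- 'int.from_bytes(prod_bytes[k*width:(k+1)*width], "little")' where prod_bytes is the
-- little-endian to_bytes of the product: reads base-(256^width) digit k, i.e.
-- (product // base^k) % base — exact for 0 ≤ product < base^(total+m) (holds under Pre_).
def pvB_digit (product base : Int) (k : Nat) : Int :=
  PySem.Int.mod (PySem.Int.floordiv product (base ^ k)) base

-- B's 'def score(end)'; 'end - 1' is a non-negative digit position for every candidate
def pvB_score (samples pre pre_sq : List Int)
    (m head_sum head_sq shift product base head_first head_next : Int) (e : Int) : Int :=
  let t := e - m
  let cross := pvB_digit product base (e - 1).toNat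
      - shift * (PySem.List.pyGetD pre e 0 - PySem.List.pyGetD pre t 0)
      - shift * head_sum - m * shift * shift
  let match_score := PySem.List.pyGetD pre_sq e 0 - PySem.List.pyGetD pre_sq t 0
      - 2 * cross + head_sq
  let tail_last := PySem.List.pyGetD samples (e - 1) 0
  let tail_prev := PySem.List.pyGetD samples (e - 2) 0
  let edge := tail_last - head_first
  let slope := (tail_last - tail_prev) - (head_next - head_first)
  match_score + 32 * edge * edge + 8 * slope * slope

def choose_loop_end_alt (samples : List Int) (match_samples : Int) (search_samples : Int) : Int :=
  let total : Int := samples.length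
  if total ≤ match_samples * 2 then total
  else
    let search_span := min search_samples (max (match_samples * 2) (PySem.Int.floordiv total 8))
    let first_candidate := max (match_samples + 1) (total - search_span)
    let m := match_samples
    let head_first := PySem.List.pyGetD samples 0 0
    let head_next := PySem.List.pyGetD samples 1 0
    let pp := pvB_prefixes samples
    let head_sum := PySem.List.pyGetD pp.1 m 0
    let head_sq := PySem.List.pyGetD pp.2 m 0
    let shift := pvB_shift samples
    -- width = max(4*m*shift*shift, 2*shift).bit_length() // 8 + 1;  base = 256 ** width
    let width := PySem.Int.floordiv ((PySem.Int.bitLength (max (4 * m * shift * shift) (2 * shift)) : Nat) : Int) 8 + 1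
    let base := (256 : Int) ^ width.toNat   -- width ≥ 1, so '.toNat' is exact
    let enc_samples := pvB_encode samples shift base
    let enc_head := pvB_encode (PySem.List.slice samples none (some m)).reverse shift base
    let product := enc_samples * enc_head
    PySem.List.minD (PySem.List.pyRange first_candidate (total + 1) 1)
      (pvB_score samples pp.1 pp.2 m head_sum head_sq shift product base head_first head_next)
      total

-- ===== PRECONDITION & SPEC =====
-- Pre_ restricts to the natural domain 0 ≤ match_samples (on negative counts A's empty
-- 'range(match_samples)' loop silently returns while B's byte encoding raises) and excludes
-- lists of fewer than 2 elements with total > 2*match_samples, where A raises IndexError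
-- reading samples[1].
def Pre_choose_loop_end (samples : List Int) (match_samples : Int) (search_samples : Int) : Prop :=
  0 ≤ match_samples ∧ (2 ≤ (samples.length : Int) ∨ (samples.length : Int) ≤ 2 * match_samples)
instance (samples : List Int) (match_samples : Int) (search_samples : Int) : Decidable (Pre_choose_loop_end samples match_samples search_samples) := by unfold Pre_choose_loop_end; infer_instance

def pvWitness_choose_loop_end : List Int × Int × Int := ([0, 1, 2, 3, 0, 1], 1, 3)

def Spec_choose_loop_end (samples : List Int) (match_samples : Int) (search_samples : Int) (out : Int) : Prop := out = choose_loop_end_alt samples match_samples search_samples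
instance (samples : List Int) (match_samples : Int) (search_samples : Int) (out : Int) : Decidable (Spec_choose_loop_end samples match_samples search_samples out) := by unfold Spec_choose_loop_end; infer_instance

-- ===== CLAIM (what is proved, stated in full; the proofs are below) =====
def Claim_equal_choose_loop_end : Prop := ∀ (samples : List Int) (match_samples : Int) (search_samples : Int), Dom_choose_loop_end samples match_samples search_samples → Pre_choose_loop_end samples match_samples search_samples → Spec_choose_loop_end samples match_samples search_samples (choose_loop_end samples match_samples search_samples)

-- ===== LEMMAS AND PROOFS =====

-- the generic one-list prefix loop (proof helper: B's paired loop splits into two of these)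
def pvPrefixList (f : Int → Int) (xs : List Int) : List Int :=
  xs.foldl (fun ps v => ps ++ [PySem.List.pyGetD ps (-1) 0 + f v]) [0]

def pvConv (samples : List Int) (s : Int) (M : Nat) (k : Nat) : Int :=
  ∑ i ∈ Finset.range M,
    if M - 1 - i ≤ k ∧ k - (M - 1 - i) < samples.length
    then (samples.getD (k - (M - 1 - i)) 0 + s) * (samples.getD i 0 + s) else 0


lemma pv_pair_split (f g : Int → Int) (xs : List Int) : ∀ (p q : List Int),
    xs.foldl (fun st v =>
      (st.1 ++ [PySem.List.pyGetD st.1 (-1) 0 + f v],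
       st.2 ++ [PySem.List.pyGetD st.2 (-1) 0 + g v])) (p, q)
    = (xs.foldl (fun ps v => ps ++ [PySem.List.pyGetD ps (-1) 0 + f v]) p,
       xs.foldl (fun ps v => ps ++ [PySem.List.pyGetD ps (-1) 0 + g v]) q) := by
  induction xs with
  | nil => intro p q; simp
  | cons x t ih => intro p q; simpa using ih _ _


lemma pv_prefixes_eq_pair (samples : List Int) :
    pvB_prefixes samples
      = (pvPrefixList (fun v => v) samples, pvPrefixList (fun v => v * v) samples) := by
  simpa [pvB_prefixes, pvPrefixList] using pv_pair_split (fun v => v) (fun v => v * v) samples [0] [0]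


lemma pv_prefixList_eq (f : Int → Int) (s : List Int) :
    pvPrefixList f s
      = (List.range (s.length + 1)).map (fun k => ((s.take k).map f).sum) := by
  induction s using List.reverseRecOn with
  | nil => simp [pvPrefixList]
  | append_singleton s x ih =>
    rw [pvPrefixList, List.foldl_append] at *
    rw [ih]
    have hlast : PySem.List.pyGetD
        ((List.range (s.length + 1)).map (fun k => ((s.take k).map f).sum)) (-1) 0
        = (s.map f).sum := by
      rw [List.range_succ, List.map_append, List.map_singleton]
      rw [PySem.List.pyGetD_neg_one_append_singleton]
      simp
    simp only [List.foldl_cons, List.foldl_nil, hlast, List.length_append, List.length_singleton]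
    rw [List.range_succ (n := s.length + 1), List.map_append, List.map_singleton]
    congr 1
    · apply List.map_congr_left
      intro k hk
      rw [List.take_append_of_le_length (by simp at hk; omega)]
    · rw [List.take_of_length_le (by simp)]
      simp


lemma pv_shift_aux (xs : List Int) : ∀ a : Int,
    a ≤ xs.foldl (fun s v => max s |v|) a
      ∧ ∀ v ∈ xs, |v| ≤ xs.foldl (fun s v => max s |v|) a := by
  induction xs with
  | nil => simp
  | cons x t ih =>
    intro a
    refine ⟨le_trans (le_max_left _ _) (ih (max a |x|)).1, ?_⟩
    intro v hv
    rcases List.mem_cons.mp hv with h | h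
    · subst h; exact le_trans (le_max_right _ _) (ih (max a |v|)).1
    · exact (ih (max a |x|)).2 v h


lemma pv_encode_eq (xs : List Int) (s b : Int) :
    pvB_encode xs s b = ∑ j ∈ Finset.range xs.length, (xs.getD j 0 + s) * b ^ j := by
  induction xs using List.reverseRecOn with
  | nil => simp [pvB_encode]
  | append_singleton t x ih =>
    rw [pvB_encode, PySem.List.enumerate_append, List.foldl_append]
    rw [PySem.List.enumerate_cons, PySem.List.enumerate_nil]
    rw [← pvB_encode, ih]
    simp only [List.foldl_cons, List.foldl_nil, List.length_append, List.length_singleton]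
    rw [Finset.sum_range_succ]
    congr 1
    · apply Finset.sum_congr rfl
      intro j hj
      rw [List.getD_append _ _ _ _ (Finset.mem_range.mp hj)]
    · rw [show ((0 : Int) + (t.length : Int)).toNat = t.length by omega]
      congr 2
      rw [List.getD_append_right _ _ _ _ (le_refl _)]
      simp


lemma pv_lowsum_bound (b : Int) (hb : 0 < b) (c : Nat → Int) (k : Nat)
    (hc : ∀ j < k, 0 ≤ c j ∧ c j < b) :
    0 ≤ ∑ j ∈ Finset.range k, c j * b ^ j ∧ (∑ j ∈ Finset.range k, c j * b ^ j) < b ^ k := by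
  induction k with
  | zero => simp
  | succ k ih =>
    obtain ⟨h0, h1⟩ := ih (fun j hj => hc j (by omega))
    obtain ⟨hck0, hck1⟩ := hc k (by omega)
    have hbk : (0:Int) < b ^ k := pow_pos hb k
    rw [Finset.sum_range_succ]
    constructor
    · positivity
    · have : c k * b ^ k ≤ (b - 1) * b ^ k := by nlinarith
      rw [pow_succ]
      nlinarith


lemma pv_digit_extract (b : Int) (hb : 0 < b) (c : Nat → Int) (L : Nat)
    (hc : ∀ j < L, 0 ≤ c j ∧ c j < b) (k : Nat) (hk : k < L) :
    pvB_digit (∑ j ∈ Finset.range L, c j * b ^ j) b k = c k := by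
  have hbk : (0:Int) < b ^ k := pow_pos hb k
  have e1 : (∑ j ∈ Finset.Ico 0 k, c j * b ^ j) + ∑ j ∈ Finset.Ico k L, c j * b ^ j
      = ∑ j ∈ Finset.Ico 0 L, c j * b ^ j :=
    Finset.sum_Ico_consecutive _ (Nat.zero_le k) (le_of_lt hk)
  simp only [← Finset.range_eq_Ico] at e1
  have e2 : ∑ j ∈ Finset.Ico k L, c j * b ^ j
      = ∑ j ∈ Finset.range (L - k), c (k + j) * b ^ (k + j) := by
    rw [Finset.sum_Ico_eq_sum_range]
  have e3 : ∑ j ∈ Finset.range (L - k), c (k + j) * b ^ (k + j)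
      = b ^ k * (c k + b * ∑ j ∈ Finset.range (L - k - 1), c (k + 1 + j) * b ^ j) := by
    obtain ⟨n, hn⟩ : ∃ n, L - k = n + 1 := ⟨L - k - 1, by omega⟩
    rw [show L - k - 1 = n by omega, hn, Finset.sum_range_succ']
    simp only [Nat.add_zero]
    have e4 : ∑ j ∈ Finset.range n, c (k + (j + 1)) * b ^ (k + (j + 1))
        = b ^ k * b * ∑ j ∈ Finset.range n, c (k + 1 + j) * b ^ j := by
      rw [Finset.mul_sum]
      apply Finset.sum_congr rfl
      intro j _
      rw [show k + (j + 1) = k + 1 + j by omega, pow_add, pow_succ]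
      ring
    rw [e4]
    ring
  have hsplit : (∑ j ∈ Finset.range L, c j * b ^ j)
      = (∑ j ∈ Finset.range k, c j * b ^ j)
        + b ^ k * (c k + b * ∑ j ∈ Finset.range (L - k - 1), c (k + 1 + j) * b ^ j) := by
    rw [← e1, e2, e3]
  rw [hsplit]
  obtain ⟨hlo0, hlo1⟩ := pv_lowsum_bound b hb c k (fun j hj => hc j (by omega))
  rw [pvB_digit, PySem.Int.floordiv_eq_ediv_of_pos hbk, PySem.Int.mod_eq_emod_of_pos hb]
  rw [Int.add_mul_ediv_left _ _ (ne_of_gt hbk)]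
  rw [Int.ediv_eq_zero_of_lt hlo0 hlo1, zero_add]
  rw [Int.add_mul_emod_self_left]
  exact Int.emod_eq_of_lt (hc k hk).1 (hc k hk).2


lemma pv_diag (F : Nat → Int) (d N K : Nat) (h : d + N ≤ K) :
    (∑ k ∈ Finset.range K, if d ≤ k ∧ k - d < N then F (k - d) else 0)
      = ∑ j ∈ Finset.range N, F j := by
  rw [← Finset.sum_filter]
  have hfil : (Finset.range K).filter (fun k => d ≤ k ∧ k - d < N) = Finset.Ico d (d + N) := by
    ext k
    simp only [Finset.mem_filter, Finset.mem_range, Finset.mem_Ico]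
    omega
  rw [hfil, Finset.sum_Ico_eq_sum_range]
  simp


lemma pv_rev_take_getD (samples : List Int) (M i : Nat) (hM : M ≤ samples.length) (hi : i < M) :
    ((samples.take M).reverse).getD i 0 = samples.getD (M - 1 - i) 0 := by
  have hlen : (samples.take M).length = M := by simp; omega
  rw [List.getD_eq_getElem _ _ (by simp [hlen]; omega)]
  rw [List.getD_eq_getElem _ _ (by omega)]
  rw [List.getElem_reverse]
  simp only [List.getElem_take]
  congr 1
  omega


lemma pv_product_eq (samples : List Int) (s b : Int) (M : Nat) (hM : M ≤ samples.length) :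
    pvB_encode samples s b * pvB_encode (samples.take M).reverse s b
      = ∑ k ∈ Finset.range (samples.length + M), pvConv samples s M k * b ^ k := by
  have hlenr : ((samples.take M).reverse).length = M := by simp; omega
  rw [pv_encode_eq, pv_encode_eq, hlenr]
  -- enc_head = Σ_i (a_i + s) * b^(M-1-i)
  have hhead : (∑ i ∈ Finset.range M, (((samples.take M).reverse).getD i 0 + s) * b ^ i)
      = ∑ i ∈ Finset.range M, (samples.getD i 0 + s) * b ^ (M - 1 - i) := by
    rw [← Finset.sum_range_reflect (fun i => (samples.getD i 0 + s) * b ^ (M - 1 - i)) M]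
    apply Finset.sum_congr rfl
    intro i hi
    have hi' : i < M := Finset.mem_range.mp hi
    rw [pv_rev_take_getD samples M i hM hi', show M - 1 - (M - 1 - i) = i by omega]
  rw [hhead, Finset.sum_mul_sum, Finset.sum_comm]
  -- RHS: unfold conv, push b^k inside, swap sums, collapse each diagonal
  have hrhs : (∑ k ∈ Finset.range (samples.length + M), pvConv samples s M k * b ^ k)
      = ∑ i ∈ Finset.range M, ∑ k ∈ Finset.range (samples.length + M),
          (if M - 1 - i ≤ k ∧ k - (M - 1 - i) < samples.length
           then (samples.getD (k - (M - 1 - i)) 0 + s) * (samples.getD i 0 + s) * b ^ k else 0) := by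
    rw [Finset.sum_comm]
    apply Finset.sum_congr rfl
    intro k _
    rw [pvConv, Finset.sum_mul]
    apply Finset.sum_congr rfl
    intro i _
    rw [ite_mul, zero_mul]
  rw [hrhs]
  apply Finset.sum_congr rfl
  intro i hi
  have hi' : i < M := Finset.mem_range.mp hi
  have hd : (M - 1 - i) + samples.length ≤ samples.length + M := by omega
  have hstep : ∀ k ∈ Finset.range (samples.length + M),
      (if M - 1 - i ≤ k ∧ k - (M - 1 - i) < samples.length
       then (samples.getD (k - (M - 1 - i)) 0 + s) * (samples.getD i 0 + s) * b ^ k else 0)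
      = (if M - 1 - i ≤ k ∧ k - (M - 1 - i) < samples.length
       then (fun j => (samples.getD j 0 + s) * (samples.getD i 0 + s) * b ^ (j + (M - 1 - i))) (k - (M - 1 - i)) else 0) := by
    intro k _
    split_ifs with hcond
    · simp only []
      congr 2
      omega
    · rfl
  rw [Finset.sum_congr rfl hstep]
  rw [pv_diag (fun j => (samples.getD j 0 + s) * (samples.getD i 0 + s) * b ^ (j + (M - 1 - i)))
        (M - 1 - i) samples.length (samples.length + M) hd]
  apply Finset.sum_congr rfl
  intro j _
  rw [pow_add]
  ring


lemma pv_getD_abs_le (samples : List Int) (s : Int) (hs : 0 ≤ s)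
    (habs : ∀ v ∈ samples, |v| ≤ s) (j : Nat) : |samples.getD j 0| ≤ s := by
  by_cases hj : j < samples.length
  · rw [List.getD_eq_getElem _ _ hj]
    exact habs _ (List.getElem_mem hj)
  · rw [List.getD_eq_default _ _ (by omega)]
    simpa using hs


lemma pv_conv_bound (samples : List Int) (s : Int) (M : Nat) (b : Int)
    (hs : 0 ≤ s) (habs : ∀ v ∈ samples, |v| ≤ s) (hb : (M : Int) * (4 * s * s) < b) (k : Nat) :
    0 ≤ pvConv samples s M k ∧ pvConv samples s M k < b := by
  have hterm : ∀ i ∈ Finset.range M,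
      0 ≤ (if M - 1 - i ≤ k ∧ k - (M - 1 - i) < samples.length
           then (samples.getD (k - (M - 1 - i)) 0 + s) * (samples.getD i 0 + s) else 0)
      ∧ (if M - 1 - i ≤ k ∧ k - (M - 1 - i) < samples.length
           then (samples.getD (k - (M - 1 - i)) 0 + s) * (samples.getD i 0 + s) else 0) ≤ 4 * s * s := by
    intro i _
    have h1 := pv_getD_abs_le samples s hs habs (k - (M - 1 - i))
    have h2 := pv_getD_abs_le samples s hs habs i
    rw [abs_le] at h1 h2
    split_ifs
    · constructor
      · nlinarith [h1.1, h2.1]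
      · nlinarith [h1.1, h1.2, h2.1, h2.2]
    · exact ⟨le_refl 0, by nlinarith⟩
  constructor
  · exact Finset.sum_nonneg (fun i hi => (hterm i hi).1)
  · calc pvConv samples s M k ≤ ∑ _i ∈ Finset.range M, (4 * s * s) :=
          Finset.sum_le_sum (fun i hi => (hterm i hi).2)
      _ = (M : Int) * (4 * s * s) := by rw [Finset.sum_const, Finset.card_range]; simp
      _ < b := hb


lemma pv_conv_at (samples : List Int) (s : Int) (M K : Nat)
    (hKM : M ≤ K) (hKN : K < samples.length) :
    pvConv samples s M K
      = ∑ i ∈ Finset.range M, (samples.getD (K + 1 - M + i) 0 + s) * (samples.getD i 0 + s) := by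
  apply Finset.sum_congr rfl
  intro i hi
  have hi' : i < M := Finset.mem_range.mp hi
  rw [if_pos (by omega)]
  congr 3
  omega


lemma pv_cross_expand (x y : Nat → Int) (s : Int) (M : Nat) :
    (∑ i ∈ Finset.range M, (x i + s) * (y i + s))
      = (∑ i ∈ Finset.range M, x i * y i) + s * (∑ i ∈ Finset.range M, x i)
        + s * (∑ i ∈ Finset.range M, y i) + (M : Int) * (s * s) := by
  induction M with
  | zero => simp
  | succ k ih =>
    simp only [Finset.sum_range_succ, ih]
    push_cast
    ring


lemma pv_X_lt_base (X : Int) :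
    X < (256 : Int) ^ ((PySem.Int.bitLength X) / 8 + 1) := by
  have h1 : X.natAbs < 2 ^ (PySem.Int.bitLength X) := PySem.Int.lt_two_pow_bitLength X
  have h2 : (2 : Nat) ^ (PySem.Int.bitLength X) ≤ 256 ^ ((PySem.Int.bitLength X) / 8 + 1) := by
    have : (256 : Nat) = 2 ^ 8 := by norm_num
    rw [this, ← pow_mul]
    exact Nat.pow_le_pow_right (by norm_num) (by omega)
  have h3 : X.natAbs < 256 ^ ((PySem.Int.bitLength X) / 8 + 1) := lt_of_lt_of_le h1 h2
  have h4 : X ≤ (X.natAbs : Int) := Int.le_natAbs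
  calc X ≤ (X.natAbs : Int) := h4
    _ < ((256 ^ ((PySem.Int.bitLength X) / 8 + 1) : Nat) : Int) := by exact_mod_cast h3
    _ = (256 : Int) ^ ((PySem.Int.bitLength X) / 8 + 1) := by push_cast; ring


lemma pv_sum_range' (f : Nat → Int) (n : Nat) :
    ((List.range n).map f).sum = ∑ i ∈ Finset.range n, f i := by
  induction n with
  | zero => simp
  | succ k ih => simp [List.range_succ, Finset.sum_range_succ, ih]


lemma pv_take_drop_eq_map' (xs : List Int) (T M : Nat) (h : T + M ≤ xs.length) :
    (xs.drop T).take M = (List.range M).map (fun k => xs.getD (T + k) 0) := by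
  apply List.ext_getElem
  · simp only [List.length_take, List.length_drop, List.length_map, List.length_range]
    omega
  · intro i h1 h2
    simp only [List.length_take, List.length_drop] at h1
    simp only [List.getElem_take, List.getElem_drop, List.getElem_map, List.getElem_range]
    rw [List.getD_eq_getElem xs 0 (by omega)]


lemma pv_prefix_getD (f : Int → Int) (samples : List Int) (i : Int)
    (h0 : 0 ≤ i) (hN : i ≤ (samples.length : Int)) :
    PySem.List.pyGetD (pvPrefixList f samples) i 0
      = ∑ j ∈ Finset.range i.toNat, f (samples.getD j 0) := by
  rw [pv_prefixList_eq, PySem.List.pyGetD_of_nonneg _ _ h0,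
      PySem.List.getD_map_range _ _ _ _ (by omega)]
  have h := pv_take_drop_eq_map' samples 0 i.toNat (by omega)
  simp only [List.drop_zero, Nat.zero_add] at h
  rw [h, List.map_map, pv_sum_range']
  rfl


lemma pv_window_sum (g : Nat → Int) (T M : Nat) :
    (∑ j ∈ Finset.range (T + M), g j) - (∑ j ∈ Finset.range T, g j)
      = ∑ i ∈ Finset.range M, g (T + i) := by
  have h := Finset.sum_Ico_consecutive g (Nat.zero_le T) (Nat.le_add_right T M)
  simp only [← Finset.range_eq_Ico] at h
  rw [← h, Finset.sum_Ico_eq_sum_range]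
  simp


lemma pv_sq_expand_fin (g h : Nat → Int) (M : Nat) :
    (∑ i ∈ Finset.range M, (g i - h i) * (g i - h i))
      = (∑ i ∈ Finset.range M, g i * g i)
        - 2 * (∑ i ∈ Finset.range M, g i * h i)
        + (∑ i ∈ Finset.range M, h i * h i) := by
  induction M with
  | zero => simp
  | succ k ih => simp only [Finset.sum_range_succ, ih]; ring


lemma pv_score_eq (samples : List Int) (ms e b : Int) (hf hn : Int)
    (hms : 0 ≤ ms) (hlt : 2 * ms < (samples.length : Int))
    (he1 : ms + 1 ≤ e) (heN : e ≤ (samples.length : Int))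
    (hb : ms * (4 * pvB_shift samples * pvB_shift samples) < b) (hbpos : 0 < b) :
    pvA_score samples (PySem.List.slice samples none (some ms)) ms hf hn e
      = pvB_score samples (pvB_prefixes samples).1 (pvB_prefixes samples).2 ms
          (PySem.List.pyGetD (pvB_prefixes samples).1 ms 0)
          (PySem.List.pyGetD (pvB_prefixes samples).2 ms 0)
          (pvB_shift samples)
          (pvB_encode samples (pvB_shift samples) b *
            pvB_encode (PySem.List.slice samples none (some ms)).reverse (pvB_shift samples) b)
          b hf hn e := by
  set s := pvB_shift samples with hs_def
  set N := samples.length with hN_def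
  set M := ms.toNat with hM_def
  set T := (e - ms).toNat with hT_def
  set K := (e - 1).toNat with hK_def
  have hMN : M < N := by omega
  have hMint : (M : Int) = ms := by omega
  have hTM : T + M ≤ N := by omega
  have hKTM : K = T + M - 1 := by omega
  have hKN : K < N := by omega
  have hMK : M ≤ K := by omega
  have hKNM : K < N + M := by omega
  obtain ⟨hs0, habs⟩ : (0:Int) ≤ s ∧ ∀ v ∈ samples, |v| ≤ s := pv_shift_aux samples 0
  have hhead : PySem.List.slice samples none (some ms) = samples.take M := by
    rw [PySem.List.slice_to samples (by omega)]
  have htake : samples.take M = (List.range M).map (fun k => samples.getD k 0) := by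
    have := pv_take_drop_eq_map' samples 0 M (by omega)
    simpa using this
  -- A's inner loop as a Finset sum
  have hA : pvA_innerScore samples (samples.take M) ms (e - ms)
      = ∑ k ∈ Finset.range M,
          (samples.getD (T + k) 0 - samples.getD k 0) * (samples.getD (T + k) 0 - samples.getD k 0) := by
    rw [pvA_innerScore, PySem.List.pyRange_one, List.foldl_map]
    simp only []
    rw [PySem.List.foldl_add]
    simp only [Int.sub_zero, zero_add]
    rw [hM_def, ← pv_sum_range']
    congr 1
    apply List.map_congr_left
    intro k hk
    have hkM : k < M := List.mem_range.mp hk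
    rw [PySem.List.pyGetD_of_nonneg samples 0 (by omega)]
    rw [show (e - ms + (k : Int)).toNat = T + k by omega]
    rw [PySem.List.pyGetD_natCast]
    rw [htake, PySem.List.getD_map_range _ _ _ _ hkM]
  -- the digit read by B is the plain cross-correlation term plus shift corrections
  have hdigit : pvB_digit
        (pvB_encode samples s b * pvB_encode (samples.take M).reverse s b) b K
      = pvConv samples s M K := by
    rw [pv_product_eq samples s b M (by omega)]
    exact pv_digit_extract b hbpos _ (N + M)
      (fun j _ => pv_conv_bound samples s M b hs0 habs (by rw [hMint]; nlinarith) j) K hKNM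
  have hconv : pvConv samples s M K
      = (∑ i ∈ Finset.range M, samples.getD (T + i) 0 * samples.getD i 0)
        + s * (∑ i ∈ Finset.range M, samples.getD (T + i) 0)
        + s * (∑ i ∈ Finset.range M, samples.getD i 0) + (M : Int) * (s * s) := by
    rw [pv_conv_at samples s M K hMK hKN]
    have hKT : K + 1 - M = T := by omega
    simp only [hKT]
    exact pv_cross_expand (fun i => samples.getD (T + i) 0) (fun i => samples.getD i 0) s M
  -- prefix reads
  have hpp := pv_prefixes_eq_pair samples
  have hpre_e : PySem.List.pyGetD (pvB_prefixes samples).1 e 0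
      = ∑ j ∈ Finset.range (T + M), samples.getD j 0 := by
    rw [hpp]
    rw [pv_prefix_getD (fun v => v) samples e (by omega) (by omega)]
    rw [show e.toNat = T + M by omega]
  have hpre_t : PySem.List.pyGetD (pvB_prefixes samples).1 (e - ms) 0
      = ∑ j ∈ Finset.range T, samples.getD j 0 := by
    rw [hpp, pv_prefix_getD (fun v => v) samples (e - ms) (by omega) (by omega)]
  have hpre_m : PySem.List.pyGetD (pvB_prefixes samples).1 ms 0
      = ∑ j ∈ Finset.range M, samples.getD j 0 := by
    rw [hpp, pv_prefix_getD (fun v => v) samples ms (by omega) (by omega)]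
  have hsq_e : PySem.List.pyGetD (pvB_prefixes samples).2 e 0
      = ∑ j ∈ Finset.range (T + M), samples.getD j 0 * samples.getD j 0 := by
    rw [hpp, pv_prefix_getD (fun v => v * v) samples e (by omega) (by omega)]
    rw [show e.toNat = T + M by omega]
  have hsq_t : PySem.List.pyGetD (pvB_prefixes samples).2 (e - ms) 0
      = ∑ j ∈ Finset.range T, samples.getD j 0 * samples.getD j 0 := by
    rw [hpp, pv_prefix_getD (fun v => v * v) samples (e - ms) (by omega) (by omega)]
  have hsq_m : PySem.List.pyGetD (pvB_prefixes samples).2 ms 0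
      = ∑ j ∈ Finset.range M, samples.getD j 0 * samples.getD j 0 := by
    rw [hpp, pv_prefix_getD (fun v => v * v) samples ms (by omega) (by omega)]
  -- assemble
  rw [pvA_score, pvB_score, hhead, hA]
  rw [hdigit, hconv, hpre_e, hpre_t, hpre_m, hsq_e, hsq_t, hsq_m]
  rw [pv_window_sum (fun j => samples.getD j 0) T M,
      pv_window_sum (fun j => samples.getD j 0 * samples.getD j 0) T M]
  rw [pv_sq_expand_fin (fun k => samples.getD (T + k) 0) (fun k => samples.getD k 0) M]
  rw [hMint]
  ring


lemma pv_sel_go (f g : Int → Int) (l : List Int) (hfg : ∀ x ∈ l, f x = g x) :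
    ∀ b : Int, f b = g b →
      ∃ mres, PySem.List.min? (b :: l) g = some mres
        ∧ l.foldl (fun st e => pvA_update (f e) e st) (some (f b), b) = (some (f mres), mres)
        ∧ f mres = g mres := by
  induction l with
  | nil => intro b hb; exact ⟨b, by simp [PySem.List.min?], by simp, hb⟩
  | cons x t ih =>
    intro b hb
    have hx : f x = g x := hfg x (by simp)
    have ht : ∀ y ∈ t, f y = g y := fun y hy => hfg y (by simp [hy])
    have hstep : PySem.List.min? (b :: x :: t) g
        = PySem.List.min? ((if g x < g b then x else b) :: t) g := by
      by_cases hc : g x < g b <;> simp [PySem.List.min?, hc]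
    have hupd : pvA_update (f x) x (some (f b), b)
        = if g x < g b then (some (f x), x) else (some (f b), b) := by
      simp [pvA_update, hx, hb]
    simp only [List.foldl_cons, hupd, hstep]
    by_cases hc : g x < g b
    · simp only [if_pos hc]
      exact ih ht x hx
    · simp only [if_neg hc]
      exact ih ht b hb


lemma pv_sel (f g : Int → Int) (l : List Int) (d : Int) (h : ∀ x ∈ l, f x = g x) :
    (l.foldl (fun st e => pvA_update (f e) e st) ((none : Option Int), d)).2
      = PySem.List.minD l g d := by
  cases l with
  | nil => simp [PySem.List.minD, PySem.List.min?]
  | cons x t =>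
    have hx : f x = g x := h x (by simp)
    have ht : ∀ y ∈ t, f y = g y := fun y hy => h y (by simp [hy])
    obtain ⟨m, hmin, hfold, _⟩ := pv_sel_go f g t ht x hx
    simp only [List.foldl_cons]
    have h1 : pvA_update (f x) x ((none : Option Int), d) = (some (f x), x) := by
      simp [pvA_update]
    rw [h1, hfold, PySem.List.minD, hmin]
    rfl


-- ===== VERDICT (by name: the statement is the Claim_ definition above) =====
theorem choose_loop_end_spec : Claim_equal_choose_loop_end := by
  intro samples ms ss _hdom hpre
  unfold Spec_choose_loop_end choose_loop_end choose_loop_end_alt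
  by_cases hb0 : (samples.length : Int) ≤ ms * 2
  · simp [hb0]
  · simp only [if_neg hb0]
    set s := pvB_shift samples with hs_def
    obtain ⟨hs0, _⟩ : (0:Int) ≤ s ∧ ∀ v ∈ samples, |v| ≤ s := pv_shift_aux samples 0
    set X := max (4 * ms * s * s) (2 * s) with hX_def
    set bl := PySem.Int.bitLength X with hbl_def
    have hw : PySem.Int.floordiv ((bl : Nat) : Int) 8 + 1 = ((bl / 8 + 1 : Nat) : Int) := by
      rw [PySem.Int.floordiv_eq_ediv_of_pos (by norm_num)]
      push_cast [Int.natCast_div]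
      ring
    have hwt : (PySem.Int.floordiv ((bl : Nat) : Int) 8 + 1).toNat = bl / 8 + 1 := by
      rw [hw]; omega
    have hbase : (256 : Int) ^ (PySem.Int.floordiv ((bl : Nat) : Int) 8 + 1).toNat
        = (256 : Int) ^ (bl / 8 + 1) := by rw [hwt]
    have hXb : X < (256 : Int) ^ (PySem.Int.floordiv ((bl : Nat) : Int) 8 + 1).toNat := by
      rw [hbase]; exact pv_X_lt_base X
    have hmb : ms * (4 * s * s) < (256 : Int) ^ (PySem.Int.floordiv ((bl : Nat) : Int) 8 + 1).toNat := by
      calc ms * (4 * s * s) = 4 * ms * s * s := by ring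
        _ ≤ X := le_max_left _ _
        _ < _ := hXb
    have hbpos : (0:Int) < (256 : Int) ^ (PySem.Int.floordiv ((bl : Nat) : Int) 8 + 1).toNat :=
      pow_pos (by norm_num) _
    apply pv_sel
    intro e he
    rw [PySem.List.mem_pyRange_one] at he
    have h8 : (0:Int) < 8 := by norm_num
    rw [PySem.Int.floordiv_eq_ediv_of_pos h8] at he
    exact pv_score_eq samples ms e _ _ _ hpre.1 (by omega) (by omega) (by omega) hmb hbpos
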